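-- pv_equiv track=rewrite | github.com/DIG-Network/proof_research | sub-problems/verifier-oracle-model/experiments/lru-memo-exists-tree-n12-r5-r7/script.py | build_r_xor_partition_masks
-- ===== SOURCE A (Python) =====
-- from itertools import combinations
--
-- N = 12
--
-- def build_r_xor_partition_masks(masks: list[int], r: int) -> list[tuple[int, int]]:
--     dom = len(masks)
--     full = (1 << dom) - 1
--     out: list[tuple[int, int]] = []
--     for idxs in combinations(range(N), r):
--         b0 = 0
--         for ki, mm in enumerate(masks):
--             p = 0
--             for i in idxs:
--                 p ^= (mm >> i) & 1
--             if p == 0: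
--                 b0 |= 1 << ki
--         b1 = full ^ b0
--         out.append((b0, b1))
--     return out
-- ===== SOURCE B (Python) =====
-- from itertools import combinations
--
-- N = 12
--
-- def build_r_xor_partition_masks(masks: list[int], r: int) -> list[tuple[int, int]]:
--     # Column method: precompute, for each bit position i, the integer cols[i] whose
--     # ki-th bit is bit i of masks[ki]; then for each r-subset, b1 (odd parity) is just
--     # the XOR of the chosen columns, and b0 = full ^ b1.
--     dom = len(masks)
--     full = (1 << dom) - 1
--     cols = []
--     for i in range(N):
--         c = 0
--         for ki, mm in enumerate(masks):
--             c |= ((mm >> i) & 1) << ki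
--         cols.append(c)
--     out: list[tuple[int, int]] = []
--     for idxs in combinations(range(N), r):
--         b1 = 0
--         for i in idxs:
--             b1 ^= cols[i]
--         out.append((full ^ b1, b1))
--     return out
-- ===== Notes on version B (the rewrite author's own statement) =====
-- stated objective: alternative
-- what changed: Instead of recomputing, for every r-subset and every mask, the parity bit by an inner loop over the subset, B precomputes one 'column' integer per bit position i (whose ki-th bit is bit i of masks[ki]) and obtains each subset's odd-parity bitset b1 as the XOR of the chosen columns, with b0 = full ^ b1 (asymptotically fewer operations when subsets are enumerated, but slower when r makes the subset list empty).
-- outside the precondition, e.g. on build_r_xor_partition_masks([1], -1): A raises ValueError, B raises ValueError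
import Mathlib
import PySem

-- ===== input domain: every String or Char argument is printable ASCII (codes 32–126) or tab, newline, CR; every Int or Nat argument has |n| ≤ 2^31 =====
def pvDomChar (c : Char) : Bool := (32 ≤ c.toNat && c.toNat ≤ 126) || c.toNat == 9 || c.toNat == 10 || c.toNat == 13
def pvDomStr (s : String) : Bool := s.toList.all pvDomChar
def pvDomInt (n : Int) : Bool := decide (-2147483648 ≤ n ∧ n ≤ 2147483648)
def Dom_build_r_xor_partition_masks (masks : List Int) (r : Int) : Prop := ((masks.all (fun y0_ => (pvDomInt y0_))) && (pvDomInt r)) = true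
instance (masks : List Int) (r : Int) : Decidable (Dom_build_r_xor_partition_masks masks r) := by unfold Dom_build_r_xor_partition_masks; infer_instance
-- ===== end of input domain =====

-- B replaces A's per-subset per-mask inner parity loop by 12 precomputed column
-- integers whose XOR gives each subset's parity bitset directly (objective: alternative).

-- itertools.combinations(l, k) in lexicographic order (shared primitive of both Pythons)
def pvCombos : List Nat → Nat → List (List Nat)
  | _, 0 => [[]]
  | [], _ + 1 => []
  | x :: xs, k + 1 => ((pvCombos xs k).map (fun c => x :: c)) ++ pvCombos xs (k + 1)

-- ===== PORT A =====
-- (mm >> i) & 1 = Int.land (Int.shiftRight mm i) 1 (Lean's Int.shiftRight is the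
-- arithmetic shift = Python's >>; Int.land/lor/xor are Python's two's-complement & | ^)
def build_r_xor_partition_masks (masks : List Int) (r : Int) : List (Int × Int) :=
  let dom := masks.length
  let full : Int := Int.shiftLeft 1 dom - 1
  (pvCombos (List.range 12) r.toNat).foldl (fun out idxs =>
    let b0 : Int := (PySem.List.enumerate masks).foldl (fun b0 kimm =>
      let p : Int := idxs.foldl (fun p i => Int.xor p (Int.land (Int.shiftRight kimm.2 i) 1)) 0
      if p = 0 then Int.lor b0 (Int.shiftLeft 1 kimm.1.toNat) else b0) 0
    let b1 : Int := Int.xor full b0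
    out ++ [(b0, b1)]) []

-- ===== PORT B =====
def build_r_xor_partition_masks_alt (masks : List Int) (r : Int) : List (Int × Int) :=
  let dom := masks.length
  let full : Int := Int.shiftLeft 1 dom - 1
  let cols : List Int := (List.range 12).foldl (fun cols i =>
    cols ++ [(PySem.List.enumerate masks).foldl (fun c kimm =>
      Int.lor c (Int.shiftLeft (Int.land (Int.shiftRight kimm.2 i) 1) kimm.1.toNat)) 0]) []
  (pvCombos (List.range 12) r.toNat).foldl (fun out idxs =>
    let b1 : Int := idxs.foldl (fun b1 i => Int.xor b1 (cols.getD i 0)) 0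
    out ++ [(Int.xor full b1, b1)]) []

-- ===== PRECONDITION & SPEC =====
-- Pre_ excludes only r < 0, where A (itertools.combinations) raises ValueError.
def Pre_build_r_xor_partition_masks (masks : List Int) (r : Int) : Prop := 0 ≤ r
instance (masks : List Int) (r : Int) : Decidable (Pre_build_r_xor_partition_masks masks r) := by unfold Pre_build_r_xor_partition_masks; infer_instance
def pvWitness_build_r_xor_partition_masks : List Int × Int := ([5, -3], 1)

def Spec_build_r_xor_partition_masks (masks : List Int) (r : Int) (out : List (Int × Int)) : Prop := out = build_r_xor_partition_masks_alt masks r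
instance (masks : List Int) (r : Int) (out : List (Int × Int)) : Decidable (Spec_build_r_xor_partition_masks masks r out) := by unfold Spec_build_r_xor_partition_masks; infer_instance

-- ===== CLAIM (what is proved, stated in full; the proofs are below) =====
def Claim_equal_build_r_xor_partition_masks : Prop := ∀ (masks : List Int) (r : Int), Dom_build_r_xor_partition_masks masks r → Pre_build_r_xor_partition_masks masks r → Spec_build_r_xor_partition_masks masks r (build_r_xor_partition_masks masks r)

-- ===== LEMMAS AND PROOFS =====

-- append-accumulating foldl is map
theorem pv_foldl_append {α β : Type} (f : α → β) : ∀ (l : List α) (acc : List β),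
    l.foldl (fun out x => out ++ [f x]) acc = acc ++ l.map f := by
  intro l
  induction l with
  | nil => simp
  | cons x xs ih => intro acc; simp [ih]

-- the bit (mm >> i) & 1 as a natural number
def pvBit (mm : Int) (i : Nat) : Nat := (Int.land (Int.shiftRight mm i) 1).toNat

theorem pvBit_int (mm : Int) (i : Nat) :
    Int.land (Int.shiftRight mm i) 1 = Int.ofNat (pvBit mm i) := by
  cases mm <;> rfl

theorem pv_ldiff_one (m : Nat) : Nat.ldiff 1 m = if m.testBit 0 then 0 else 1 := by
  apply Nat.eq_of_testBit_eq
  intro j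
  rw [Nat.testBit_ldiff]
  cases j with
  | zero => by_cases h : m.testBit 0 <;> simp [h]
  | succ j =>
      have h1 : Nat.testBit 1 (j + 1) = false :=
        Nat.testBit_lt_two_pow (by
          calc (1 : Nat) < 2 ^ 1 := by norm_num
          _ ≤ 2 ^ (j + 1) := Nat.pow_le_pow_right (by norm_num) (by omega))
      by_cases h : m.testBit 0 <;> simp [h, h1]

theorem pvBit_lt (mm : Int) (i : Nat) : pvBit mm i < 2 := by
  cases mm with
  | ofNat n =>
      show ((n >>> i) &&& 1) < 2
      rw [Nat.and_one_is_mod]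
      exact Nat.mod_lt _ (by norm_num)
  | negSucc n =>
      show Nat.ldiff 1 (n >>> i) < 2
      rw [pv_ldiff_one]
      split <;> norm_num

-- disjoint-bit accumulator: (h mask₀ <<< s) ||| (h mask₁ <<< (s+1)) ||| …
def pvAcc (h : Int → Nat) : List Int → Nat → Nat
  | [], _ => 0
  | mm :: rest, s => ((h mm) <<< s) ||| pvAcc h rest (s + 1)

theorem pv_testBit_lt_two {n : Nat} (h : n < 2) (j : Nat) :
    n.testBit j = (decide (j = 0) && decide (n = 1)) := by
  interval_cases n <;> cases j <;> simp [Nat.testBit_succ, Nat.zero_testBit]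

theorem pv_testBit_pvAcc (h : Int → Nat) (hh : ∀ mm, h mm < 2) :
    ∀ (masks : List Int) (s k : Nat),
      (pvAcc h masks s).testBit k
        = (decide (s ≤ k) && decide (k - s < masks.length) && decide (h (masks.getD (k - s) 0) = 1)) := by
  intro masks
  induction masks with
  | nil => intro s k; simp [pvAcc, Nat.zero_testBit]
  | cons mm rest ih =>
      intro s k
      rw [pvAcc, Nat.testBit_lor, Nat.testBit_shiftLeft, pv_testBit_lt_two (hh mm), ih]
      by_cases hsk : s ≤ k
      · by_cases hks : k = s
        · subst hks
          simp
        · have h1 : k - s = (k - (s + 1)) + 1 := by omega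
          have h2 : s + 1 ≤ k := by omega
          simp [hsk, h2, h1]
      · have h2 : ¬ (s + 1 ≤ k) := by omega
        simp [hsk, h2]

-- generic loop over enumerate(masks) OR-ing (h mm) << ki into the accumulator
theorem pv_foldl_enum (body : Int → Int × Int → Int) (h : Int → Nat)
    (hb : ∀ (c k : Nat) (mm : Int), body (Int.ofNat c) (Int.ofNat k, mm) = Int.ofNat (c ||| ((h mm) <<< k))) :
    ∀ (masks : List Int) (s c : Nat),
      (PySem.List.enumerate masks (Int.ofNat s)).foldl body (Int.ofNat c)
        = Int.ofNat (c ||| pvAcc h masks s) := by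
  intro masks
  induction masks with
  | nil => intro s c; simp [PySem.List.enumerate_nil, pvAcc]
  | cons mm rest ih =>
      intro s c
      rw [PySem.List.enumerate_cons, List.foldl_cons, hb]
      have : (Int.ofNat s) + 1 = Int.ofNat (s + 1) := by simp
      rw [this, ih, pvAcc, Nat.lor_assoc]

-- A's inner parity loop, naturalized
theorem pv_pfold_int (mm : Int) : ∀ (idxs : List Nat) (p : Nat),
    idxs.foldl (fun p i => Int.xor p (Int.land (Int.shiftRight mm i) 1)) (Int.ofNat p)
      = Int.ofNat (idxs.foldl (fun p i => p ^^^ pvBit mm i) p) := by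
  intro idxs
  induction idxs with
  | nil => intro p; rfl
  | cons i is ih =>
      intro p
      rw [List.foldl_cons, pvBit_int]
      have : Int.xor (Int.ofNat p) (Int.ofNat (pvBit mm i)) = Int.ofNat (p ^^^ pvBit mm i) := rfl
      rw [this, ih, List.foldl_cons]

def pvP (idxs : List Nat) (mm : Int) : Nat := idxs.foldl (fun p i => p ^^^ pvBit mm i) 0

theorem pv_xor2 {a b : Nat} (ha : a < 2) (hb : b < 2) :
    (a ^^^ b) < 2 ∧ decide ((a ^^^ b) = 1) = (decide (a = 1) ^^ decide (b = 1)) := by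
  interval_cases a <;> interval_cases b <;> simp

theorem pv_pfold_lt (mm : Int) : ∀ (idxs : List Nat) (p : Nat), p < 2 →
    idxs.foldl (fun p i => p ^^^ pvBit mm i) p < 2 := by
  intro idxs
  induction idxs with
  | nil => intro p hp; exact hp
  | cons i is ih =>
      intro p hp
      exact ih _ (pv_xor2 hp (pvBit_lt mm i)).1

theorem pv_pfold_bool (mm : Int) : ∀ (idxs : List Nat) (p : Nat), p < 2 →
    decide ((idxs.foldl (fun p i => p ^^^ pvBit mm i) p) = 1)
      = idxs.foldl (fun b i => b ^^ decide (pvBit mm i = 1)) (decide (p = 1)) := by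
  intro idxs
  induction idxs with
  | nil => intro p _; rfl
  | cons i is ih =>
      intro p hp
      rw [List.foldl_cons, List.foldl_cons, ih _ (pv_xor2 hp (pvBit_lt mm i)).1,
        (pv_xor2 hp (pvBit_lt mm i)).2]

theorem pv_testBit_foldl_xor (g : Nat → Nat) : ∀ (idxs : List Nat) (a k : Nat),
    (idxs.foldl (fun a i => a ^^^ g i) a).testBit k
      = idxs.foldl (fun b i => b ^^ (g i).testBit k) (a.testBit k) := by
  intro idxs
  induction idxs with
  | nil => intro a k; rfl
  | cons i is ih => intro a k; rw [List.foldl_cons, ih, Nat.testBit_xor, List.foldl_cons]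

theorem pv_bfold_false (g : Nat → Bool) : ∀ (idxs : List Nat) (b : Bool),
    (∀ i ∈ idxs, g i = false) → idxs.foldl (fun b i => b ^^ g i) b = b := by
  intro idxs
  induction idxs with
  | nil => intro b _; rfl
  | cons i is ih =>
      intro b hg
      rw [List.foldl_cons, hg i (by simp)]
      simp only [Bool.xor_false]
      exact ih b (fun j hj => hg j (by simp [hj]))

theorem pv_bfold_congr (g g' : Nat → Bool) : ∀ (idxs : List Nat) (b : Bool),
    (∀ i ∈ idxs, g i = g' i) → idxs.foldl (fun b i => b ^^ g i) b = idxs.foldl (fun b i => b ^^ g' i) b := by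
  intro idxs
  induction idxs with
  | nil => intro b _; rfl
  | cons i is ih =>
      intro b hg
      rw [List.foldl_cons, List.foldl_cons, hg i (by simp)]
      exact ih _ (fun j hj => hg j (by simp [hj]))

def pvCol (masks : List Int) (i : Nat) : Nat := pvAcc (fun mm => pvBit mm i) masks 0
def pvHA (idxs : List Nat) (mm : Int) : Nat := if pvP idxs mm = 0 then 1 else 0

-- the central identity: XOR of chosen columns = full ^^^ b0
theorem pv_core (masks : List Int) (idxs : List Nat) :
    idxs.foldl (fun a i => a ^^^ pvCol masks i) 0
      = (2 ^ masks.length - 1) ^^^ pvAcc (pvHA idxs) masks 0 := by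
  apply Nat.eq_of_testBit_eq
  intro k
  rw [pv_testBit_foldl_xor, Nat.testBit_xor, Nat.testBit_two_pow_sub_one,
    pv_testBit_pvAcc (pvHA idxs) (fun mm => by unfold pvHA; split <;> norm_num)]
  simp only [Nat.zero_testBit]
  by_cases hk : k < masks.length
  · have hcol : ∀ i, (pvCol masks i).testBit k = decide (pvBit (masks.getD k 0) i = 1) := by
      intro i
      rw [pvCol, pv_testBit_pvAcc _ (fun mm => pvBit_lt mm i)]
      simp [hk]
    rw [pv_bfold_congr _ _ idxs false (fun i _ => hcol i)]
    have hfold := pv_pfold_bool (masks.getD k 0) idxs 0 (by norm_num)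
    have hlt := pv_pfold_lt (masks.getD k 0) idxs 0 (by norm_num)
    have hsz : decide (k - 0 < masks.length) = true := by simpa using hk
    have hle : decide ((0:Nat) ≤ k) = true := by simp
    rw [hsz, hle]
    simp only [Nat.testBit_two_pow_sub_one] at *
    rw [show decide (k < masks.length) = true from by simpa using hk]
    simp only [Bool.true_and, Bool.true_xor, Nat.sub_zero]
    have hha : decide (pvHA idxs (masks.getD k 0) = 1) = decide (pvP idxs (masks.getD k 0) = 0) := by
      by_cases h : pvP idxs (masks.getD k 0) = 0 <;> simp [pvHA, h]
    rw [hha]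
    rw [show (decide ((0:Nat) = 1)) = false from rfl] at hfold
    rw [← hfold]
    unfold pvP
    rcases (by omega : idxs.foldl (fun p i => p ^^^ pvBit (masks.getD k 0) i) 0 = 0 ∨
        idxs.foldl (fun p i => p ^^^ pvBit (masks.getD k 0) i) 0 = 1) with h | h <;> rw [h] <;> simp
  · have : ∀ i ∈ idxs, (pvCol masks i).testBit k = false := by
      intro i _
      rw [pvCol, pv_testBit_pvAcc _ (fun mm => pvBit_lt mm i)]
      simp [hk]
    rw [pv_bfold_false _ idxs false this]
    simp [hk]

-- elements of a combination come from the base list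
theorem pv_mem_pvCombos : ∀ (l : List Nat) (k : Nat) (c : List Nat),
    c ∈ pvCombos l k → ∀ i ∈ c, i ∈ l := by
  intro l
  induction l with
  | nil =>
      intro k c hc
      cases k with
      | zero => simp [pvCombos] at hc; subst hc; simp
      | succ k => simp [pvCombos] at hc
  | cons x xs ih =>
      intro k c hc
      cases k with
      | zero => simp [pvCombos] at hc; subst hc; simp
      | succ k =>
          rw [pvCombos, List.mem_append] at hc
          rcases hc with hc | hc
          · rcases List.mem_map.1 hc with ⟨c', hc', rfl⟩
            intro i hi
            rcases List.mem_cons.1 hi with rfl | hi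
            · simp
            · exact List.mem_cons_of_mem _ (ih k c' hc' i hi)
          · intro i hi
            exact List.mem_cons_of_mem _ (ih (k + 1) c hc i hi)

theorem pv_full_eq (dom : Nat) : (Int.shiftLeft 1 dom - 1 : Int) = Int.ofNat (2 ^ dom - 1) := by
  have h1 : (Int.shiftLeft 1 dom : Int) = Int.ofNat (1 <<< dom) := rfl
  rw [h1, Nat.one_shiftLeft]
  show ((2 ^ dom : Nat) : Int) - 1 = ((2 ^ dom - 1 : Nat) : Int)
  rw [Nat.cast_sub Nat.one_le_two_pow]
  simp

theorem pv_cols_getD (masks : List Int) (i : Nat) (hi : i < 12) :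
    ((List.range 12).foldl (fun cols j =>
        cols ++ [(PySem.List.enumerate masks).foldl (fun c kimm =>
          Int.lor c (Int.shiftLeft (Int.land (Int.shiftRight kimm.2 j) 1) kimm.1.toNat)) 0]) []).getD i 0
      = Int.ofNat (pvCol masks i) := by
  rw [pv_foldl_append]
  simp only [List.nil_append]
  have hget : ((List.range 12).map (fun j =>
      (PySem.List.enumerate masks).foldl (fun c kimm =>
        Int.lor c (Int.shiftLeft (Int.land (Int.shiftRight kimm.2 j) 1) kimm.1.toNat)) 0)).getD i 0
      = (PySem.List.enumerate masks).foldl (fun c kimm =>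
        Int.lor c (Int.shiftLeft (Int.land (Int.shiftRight kimm.2 i) 1) kimm.1.toNat)) 0 := by
    simp [List.getD, hi]
  rw [hget]
  have := pv_foldl_enum
    (fun c kimm => Int.lor c (Int.shiftLeft (Int.land (Int.shiftRight kimm.2 i) 1) kimm.1.toNat))
    (fun mm => pvBit mm i)
    (by
      intro c k mm
      simp only
      rw [pvBit_int]
      rfl)
    masks 0 0
  simpa [pvCol, PySem.List.enumerate] using this

-- B's xor loop over the chosen columns, naturalized
theorem pv_b1_int (masks : List Int) : ∀ (idxs : List Nat), (∀ i ∈ idxs, i < 12) → ∀ (a : Nat),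
    idxs.foldl (fun b1 i =>
      Int.xor b1 (((List.range 12).foldl (fun cols j =>
        cols ++ [(PySem.List.enumerate masks).foldl (fun c kimm =>
          Int.lor c (Int.shiftLeft (Int.land (Int.shiftRight kimm.2 j) 1) kimm.1.toNat)) 0]) []).getD i 0))
      (Int.ofNat a)
      = Int.ofNat (idxs.foldl (fun a i => a ^^^ pvCol masks i) a) := by
  intro idxs
  induction idxs with
  | nil => intro _ a; rfl
  | cons i is ih =>
      intro hmem a
      rw [List.foldl_cons, pv_cols_getD masks i (hmem i (by simp))]
      have : Int.xor (Int.ofNat a) (Int.ofNat (pvCol masks i)) = Int.ofNat (a ^^^ pvCol masks i) := rfl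
      rw [this, ih (fun j hj => hmem j (by simp [hj])), List.foldl_cons]

-- A's b0 loop, naturalized
theorem pv_b0_int (masks : List Int) (idxs : List Nat) :
    (PySem.List.enumerate masks).foldl (fun b0 kimm =>
      let p : Int := idxs.foldl (fun p i => Int.xor p (Int.land (Int.shiftRight kimm.2 i) 1)) 0
      if p = 0 then Int.lor b0 (Int.shiftLeft 1 kimm.1.toNat) else b0) 0
      = Int.ofNat (pvAcc (pvHA idxs) masks 0) := by
  have := pv_foldl_enum
    (fun b0 kimm =>
      let p : Int := idxs.foldl (fun p i => Int.xor p (Int.land (Int.shiftRight kimm.2 i) 1)) 0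
      if p = 0 then Int.lor b0 (Int.shiftLeft 1 kimm.1.toNat) else b0)
    (pvHA idxs)
    (by
      intro c k mm
      simp only
      have hp := pv_pfold_int mm idxs 0
      simp only [show Int.ofNat 0 = (0 : Int) from rfl] at hp
      rw [hp]
      by_cases hp : pvP idxs mm = 0
      · have : Int.ofNat (idxs.foldl (fun p i => p ^^^ pvBit mm i) 0) = 0 := by
          rw [show idxs.foldl (fun p i => p ^^^ pvBit mm i) 0 = pvP idxs mm from rfl, hp]; rfl
        rw [if_pos this]
        have h1 : pvHA idxs mm = 1 := by simp [pvHA, hp]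
        rw [h1]
        rfl
      · have : ¬ (Int.ofNat (idxs.foldl (fun p i => p ^^^ pvBit mm i) 0) = 0) := by
          rw [show idxs.foldl (fun p i => p ^^^ pvBit mm i) 0 = pvP idxs mm from rfl]
          simpa using hp
        rw [if_neg this]
        have h0 : pvHA idxs mm = 0 := by simp [pvHA, hp]
        rw [h0]
        simp [Nat.zero_shiftLeft])
    masks 0 0
  simpa [PySem.List.enumerate] using this

-- ===== VERDICT (by name: the statement is the Claim_ definition above) =====
theorem build_r_xor_partition_masks_spec : Claim_equal_build_r_xor_partition_masks := by
  intro masks r _ _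
  unfold Spec_build_r_xor_partition_masks build_r_xor_partition_masks build_r_xor_partition_masks_alt
  simp only
  rw [pv_foldl_append, pv_foldl_append]
  simp only [List.nil_append]
  apply List.map_congr_left
  intro idxs hidxs
  have hmem : ∀ i ∈ idxs, i < 12 := by
    intro i hi
    have := pv_mem_pvCombos (List.range 12) r.toNat idxs hidxs i hi
    simpa using this
  have hb1 := pv_b1_int masks idxs hmem 0
  simp only [show Int.ofNat 0 = (0 : Int) from rfl] at hb1
  rw [pv_b0_int masks idxs, hb1, pv_core masks idxs, pv_full_eq]
  have hxor : ∀ a b : Nat, Int.xor (Int.ofNat a) (Int.ofNat b) = Int.ofNat (a ^^^ b) := fun _ _ => rfl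
  rw [hxor, hxor, Nat.xor_xor_cancel_left]
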